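-- pv_equiv track=rewrite | github.com/huynkawa/Tomtran_corp_strategy | src/p1a_table_validator.py | detect_sheet
-- ===== SOURCE A (Python) =====
-- from typing import List, Dict, Optional, Tuple, Any
--
-- def detect_sheet(rows: List[Dict[str,str]]) -> str:
--     codes = {r.get("code") for r in rows}
--     if "270" in codes or "440" in codes:
--         return "balance_sheet"
--     if {"50","60"} & codes:
--         return "income_statement_total"
--     if {"03","10","19"} & codes:
--         return "income_statement_insurance"
--     return "generic"
-- ===== SOURCE B (Python) =====
-- _RANK = {'270': 0, '440': 0, '50': 1, '60': 1, '03': 2, '10': 2, '19': 2}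
-- _LABELS = ['balance_sheet', 'income_statement_total',
--            'income_statement_insurance', 'generic']
--
-- def _rank(code):
--     if code is None:
--         return 3
--     return _RANK.get(code, 3)
--
-- def detect_sheet(rows):
--     best = 3
--     for r in rows:
--         best = min(best, _rank(r.get("code")))
--     return _LABELS[best]
-- ===== Notes on version B (the rewrite author's own statement) =====
-- stated objective: idiomatic
-- what changed: replaced the set construction plus three ordered set-membership/intersection tests by a precomputed code-to-priority table and a single min-reduction pass over the rows, returning a label indexed by the best rank
import Mathlib
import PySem

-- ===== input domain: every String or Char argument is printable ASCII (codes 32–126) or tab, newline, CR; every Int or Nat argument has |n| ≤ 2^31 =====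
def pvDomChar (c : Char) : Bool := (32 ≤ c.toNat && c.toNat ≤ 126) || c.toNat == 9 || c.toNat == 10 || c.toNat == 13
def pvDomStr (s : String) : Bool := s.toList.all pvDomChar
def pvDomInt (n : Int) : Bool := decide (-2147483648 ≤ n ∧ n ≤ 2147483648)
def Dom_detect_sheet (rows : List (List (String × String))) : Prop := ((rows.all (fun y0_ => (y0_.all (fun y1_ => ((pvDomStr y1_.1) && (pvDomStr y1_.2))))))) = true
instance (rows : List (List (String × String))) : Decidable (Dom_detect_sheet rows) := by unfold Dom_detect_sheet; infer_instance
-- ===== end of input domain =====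

-- B replaces A's set-building and ordered membership/intersection tests by a
-- precomputed code→priority table and a single min-reduction pass (idiomatic; same O(n) cost).


-- ===== PORT A =====
def detect_sheet (rows : List (List (String × String))) : String :=
  let codes : PySem.Set (Option String) :=
    PySem.Set.ofList (rows.map (fun r => PySem.Dict.get? (PySem.Dict.mk r) "code"))
  if codes.contains (some "270") || codes.contains (some "440") then "balance_sheet"
  else if PySem.Set.inter (PySem.Set.ofList [some "50", some "60"]) codes ≠ [] then
    "income_statement_total"
  else if PySem.Set.inter (PySem.Set.ofList [some "03", some "10", some "19"]) codes ≠ [] then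
    "income_statement_insurance"
  else "generic"

-- ===== PORT B =====
def pvRank : PySem.Dict String Int :=
  PySem.Dict.mk [("270", 0), ("440", 0), ("50", 1), ("60", 1), ("03", 2), ("10", 2), ("19", 2)]

def pvLabels : List String :=
  ["balance_sheet", "income_statement_total", "income_statement_insurance", "generic"]

def pvRankOf (code : Option String) : Int :=
  match code with
  | none => 3
  | some c => (PySem.Dict.get? pvRank c).getD 3

def detect_sheet_alt (rows : List (List (String × String))) : String :=
  let best : Int :=
    rows.foldl (fun b r => min b (pvRankOf (PySem.Dict.get? (PySem.Dict.mk r) "code"))) 3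
  (PySem.List.pyGet? pvLabels best).getD "generic"  -- best ∈ [0,3]: always in range

-- ===== PRECONDITION & SPEC =====
def Spec_detect_sheet (rows : List (List (String × String))) (out : String) : Prop := out = detect_sheet_alt rows
instance (rows : List (List (String × String))) (out : String) : Decidable (Spec_detect_sheet rows out) := by unfold Spec_detect_sheet; infer_instance

-- ===== CLAIM (what is proved, stated in full; the proofs are below) =====
def Claim_equal_detect_sheet : Prop := ∀ (rows : List (List (String × String))), Dom_detect_sheet rows → Spec_detect_sheet rows (detect_sheet rows)

-- ===== LEMMAS AND PROOFS =====

-- the rank table lookup as a chain of string comparisons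
theorem pvRank_lookup (s : String) : (PySem.Dict.get? pvRank s).getD 3 =
    if s = "270" then 0 else if s = "440" then 0 else if s = "50" then 1
    else if s = "60" then 1 else if s = "03" then 2 else if s = "10" then 2
    else if s = "19" then 2 else (3 : Int) := by
  simp only [pvRank, PySem.Dict.get?_mk_cons]
  split_ifs <;> simp_all [beq_iff_eq, PySem.Dict.get?]

theorem pvRankOf_bounds (c : Option String) : 0 ≤ pvRankOf c ∧ pvRankOf c ≤ 3 := by
  cases c with
  | none => simp [pvRankOf]
  | some s => rw [pvRankOf, pvRank_lookup]; split_ifs <;> omega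

def pvStep (b : Int) (c : Option String) : Int := min b (pvRankOf c)

-- shifting the accumulator out of the fold
theorem foldl_step_init (cs : List (Option String)) (b : Int) (hb : b ≤ 3) :
    cs.foldl pvStep b = min b (cs.foldl pvStep 3) := by
  induction cs generalizing b with
  | nil => simp; omega
  | cons c cs ih =>
    have h := pvRankOf_bounds c
    simp only [List.foldl_cons]
    rw [ih (pvStep b c) (by simp only [pvStep]; omega),
        ih (pvStep 3 c) (by simp only [pvStep]; omega)]
    simp only [pvStep]; omega

theorem foldl_step_le_iff (cs : List (Option String)) (k : Int) (hk : k < 3) :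
    cs.foldl pvStep 3 ≤ k ↔ ∃ c ∈ cs, pvRankOf c ≤ k := by
  induction cs with
  | nil => simp; omega
  | cons c cs ih =>
    have h := pvRankOf_bounds c
    simp only [List.foldl_cons]
    rw [foldl_step_init cs (pvStep 3 c) (by simp only [pvStep]; omega)]
    simp only [pvStep, List.mem_cons]
    constructor
    · intro hle
      rcases le_or_gt (pvRankOf c) k with h1 | h1
      · exact ⟨c, Or.inl rfl, h1⟩
      · have : cs.foldl pvStep 3 ≤ k := by omega
        obtain ⟨d, hd, hdk⟩ := ih.mp this
        exact ⟨d, Or.inr hd, hdk⟩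
    · rintro ⟨d, (rfl | hd), hdk⟩
      · omega
      · have := ih.mpr ⟨d, hd, hdk⟩; omega

theorem foldl_step_nonneg (cs : List (Option String)) : 0 ≤ cs.foldl pvStep 3 := by
  induction cs with
  | nil => simp
  | cons c cs ih =>
    have h := pvRankOf_bounds c
    simp only [List.foldl_cons]
    rw [foldl_step_init cs (pvStep 3 c) (by simp only [pvStep]; omega)]
    simp only [pvStep]; omega

-- characterising membership in the rank classes
theorem pvRankOf_le_zero (c : Option String) :
    pvRankOf c ≤ 0 ↔ c = some "270" ∨ c = some "440" := by
  cases c with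
  | none => simp [pvRankOf]
  | some s => rw [pvRankOf, pvRank_lookup]; split_ifs <;> simp_all

theorem pvRankOf_le_one (c : Option String) :
    pvRankOf c ≤ 1 ↔ c = some "270" ∨ c = some "440" ∨ c = some "50" ∨ c = some "60" := by
  cases c with
  | none => simp [pvRankOf]
  | some s => rw [pvRankOf, pvRank_lookup]; split_ifs <;> simp_all

theorem pvRankOf_le_two (c : Option String) :
    pvRankOf c ≤ 2 ↔ c = some "270" ∨ c = some "440" ∨ c = some "50" ∨ c = some "60" ∨
      c = some "03" ∨ c = some "10" ∨ c = some "19" := by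
  cases c with
  | none => simp [pvRankOf]
  | some s => rw [pvRankOf, pvRank_lookup]; split_ifs <;> simp_all

-- ===== VERDICT (by name: the statement is the Claim_ definition above) =====
theorem detect_sheet_spec : Claim_equal_detect_sheet := by
  intro rows _
  unfold Spec_detect_sheet detect_sheet detect_sheet_alt
  simp only []
  have hfold : rows.foldl (fun b r => min b (pvRankOf (PySem.Dict.get? (PySem.Dict.mk r) "code"))) 3
      = (rows.map (fun r => PySem.Dict.get? (PySem.Dict.mk r) "code")).foldl pvStep 3 := by
    rw [List.foldl_map]; rfl
  rw [hfold]
  generalize rows.map (fun r => PySem.Dict.get? (PySem.Dict.mk r) "code") = cs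
  have hFle : cs.foldl pvStep 3 ≤ 3 := by rw [foldl_step_init cs 3 le_rfl]; omega
  have hFge := foldl_step_nonneg cs
  have hc0 : ∀ x : Option String, (PySem.Set.ofList cs).contains x = true ↔ x ∈ cs := by
    intro x; simp [PySem.Set.contains, PySem.Set.mem_ofList]
  have hc1 : ∀ l : List (Option String),
      PySem.Set.inter (PySem.Set.ofList l) (PySem.Set.ofList cs) ≠ ([] : List (Option String))
      ↔ ∃ x ∈ l, x ∈ cs := by
    intro l
    simp [PySem.Set.inter, Ne, List.filter_eq_nil_iff, PySem.Set.contains,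
      PySem.Set.mem_ofList]
  split_ifs with g0 g1 g2
  · -- balance_sheet
    simp only [Bool.or_eq_true, hc0] at g0
    have h0 : cs.foldl pvStep 3 ≤ 0 := by
      rw [foldl_step_le_iff cs 0 (by omega)]
      rcases g0 with h | h <;> exact ⟨_, h, by rw [pvRankOf_le_zero]; tauto⟩
    have : cs.foldl pvStep 3 = 0 := by omega
    rw [this]; rfl
  · -- income_statement_total
    simp only [Bool.or_eq_true, hc0] at g0
    rw [hc1] at g1
    simp only [List.mem_cons, List.not_mem_nil, or_false, exists_eq_or_imp, exists_eq_left] at g1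
    have hle : cs.foldl pvStep 3 ≤ 1 := by
      rw [foldl_step_le_iff cs 1 (by omega)]
      rcases g1 with h | h <;> exact ⟨_, h, by rw [pvRankOf_le_one]; tauto⟩
    have hgt : ¬ cs.foldl pvStep 3 ≤ 0 := by
      rw [foldl_step_le_iff cs 0 (by omega)]
      rintro ⟨c, hc, hck⟩
      rcases (pvRankOf_le_zero c).mp hck with rfl | rfl <;> tauto
    have : cs.foldl pvStep 3 = 1 := by omega
    rw [this]; rfl
  · -- income_statement_insurance
    simp only [Bool.or_eq_true, hc0] at g0
    rw [hc1] at g1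
    rw [hc1] at g2
    simp only [List.mem_cons, List.not_mem_nil, or_false, exists_eq_or_imp, exists_eq_left] at g1 g2
    have hle : cs.foldl pvStep 3 ≤ 2 := by
      rw [foldl_step_le_iff cs 2 (by omega)]
      rcases g2 with h | h | h <;> exact ⟨_, h, by rw [pvRankOf_le_two]; tauto⟩
    have hgt : ¬ cs.foldl pvStep 3 ≤ 1 := by
      rw [foldl_step_le_iff cs 1 (by omega)]
      rintro ⟨c, hc, hck⟩
      rcases (pvRankOf_le_one c).mp hck with rfl | rfl | rfl | rfl <;> tauto
    have : cs.foldl pvStep 3 = 2 := by omega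
    rw [this]; rfl
  · -- generic
    simp only [Bool.or_eq_true, hc0] at g0
    rw [hc1] at g1
    rw [hc1] at g2
    simp only [List.mem_cons, List.not_mem_nil, or_false, exists_eq_or_imp, exists_eq_left] at g1 g2
    have hgt : ¬ cs.foldl pvStep 3 ≤ 2 := by
      rw [foldl_step_le_iff cs 2 (by omega)]
      rintro ⟨c, hc, hck⟩
      rcases (pvRankOf_le_two c).mp hck with rfl | rfl | rfl | rfl | rfl | rfl | rfl <;> tauto
    have : cs.foldl pvStep 3 = 3 := by omega
    rw [this]; rfl
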